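-- pv_equiv track=rewrite | github.com/anonymousAnalyst22/LLMIF | fuzzing-controller/spec/libs/process_pdf.py | text_to_chunks
-- ===== SOURCE A (Python) =====
-- def text_to_chunks(texts:'list[str]', word_length=300, start_page=1):
--    text_toks = [t.split(' ') for t in texts]
--    chunks = []
--    for idx, words in enumerate(text_toks):
--        for i in range(0, len(words), word_length):
--            chunk = words[i : i + word_length]
--            if (
--                (i + word_length) > len(words)
--                and (len(chunk) < word_length)
--                and (len(text_toks) != (idx + 1))
--            ):
--                text_toks[idx + 1] = chunk + text_toks[idx + 1]
--                continue
--            chunk = ' '.join(chunk).strip()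
--            chunk = f'[Page no. {idx+start_page}]' + ' ' + '"' + chunk + '"'
--            chunks.append(chunk)
--    return chunks
-- ===== SOURCE B (Python) =====
-- def text_to_chunks(texts: 'list[str]', word_length=300, start_page=1):
--     # Flatten all pages into one global word stream (page boundaries never change
--     # chunk contents, only labels), then chunk it and look up each full chunk's page
--     # from the cumulative token counts; a trailing partial chunk belongs to the last page.
--     words = []
--     cum = []
--     for t in texts:
--         words.extend(t.split(' '))
--         cum.append(len(words))
--     chunks = []
--     for j in range(0, len(words), word_length):
--         chunk = words[j:j + word_length]
--         if len(chunk) == word_length: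
--             page = next(i for i, c in enumerate(cum) if j + word_length <= c)
--         else:
--             page = len(texts) - 1
--         chunks.append(f'[Page no. {page + start_page}] "' + ' '.join(chunk).strip() + '"')
--     return chunks
-- ===== Notes on version B (the rewrite author's own statement) =====
-- stated objective: faster
-- what changed: A chunks page by page and repeatedly concatenates a short trailing chunk onto the next page's token list (quadratic when the carry keeps growing); B flattens all pages into one global word stream, chunks that stream once, and recovers each full chunk's page label by searching the cumulative token counts (a trailing partial chunk is labelled with the last page).
-- outside the precondition, e.g. on text_to_chunks([], 0, 1): A returns [], B raises ValueError
import Mathlib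
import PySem

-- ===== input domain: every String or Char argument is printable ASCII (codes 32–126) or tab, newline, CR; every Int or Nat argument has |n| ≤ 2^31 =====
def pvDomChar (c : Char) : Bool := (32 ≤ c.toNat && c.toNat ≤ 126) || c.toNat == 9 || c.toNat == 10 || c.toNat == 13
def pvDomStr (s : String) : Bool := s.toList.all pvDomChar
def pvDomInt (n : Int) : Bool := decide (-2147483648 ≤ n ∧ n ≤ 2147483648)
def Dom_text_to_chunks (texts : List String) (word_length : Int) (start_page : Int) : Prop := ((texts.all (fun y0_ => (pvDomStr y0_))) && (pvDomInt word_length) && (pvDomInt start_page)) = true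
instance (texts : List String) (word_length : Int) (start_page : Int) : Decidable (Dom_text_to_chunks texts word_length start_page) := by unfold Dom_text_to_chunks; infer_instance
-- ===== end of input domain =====

-- B replaces A's page-by-page loop (which mutates the next page's token list to push a short
-- trailing chunk forward) by chunking the flattened global word stream once and recovering page
-- labels from cumulative token counts (objective: faster — measured; A is quadratic when carries keep spilling).


-- t.split(' ')  (the separator is the non-empty literal ' ', so split? is always `some`)
def pvSplitSp (t : String) : List String := (PySem.Str.split? t " ").getD []

-- f'[Page no. {page}]' + ' ' + '"' + ' '.join(chunk).strip() + '"'   (shared by both Pythons verbatim)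
def pvFmt (page : Int) (chunk : List String) : String :=
  PySem.Str.join "" ["[Page no. ", PySem.Int.toStr page, "]", " ", "\"",
    PySem.Str.strip (PySem.Str.join " " chunk), "\""]

-- ===== PORT A =====
-- inner `for i in range(...)` loop; the first state component is the live tail of text_toks
-- (Python's enumerate iterates the list being mutated, and only text_toks[idx+1] is ever written).
def pvAFold (idxs : List Int) (words : List String) (wl page : Int) (notLast : Bool)
    (st : List (List String) × List String) : List (List String) × List String :=
  idxs.foldl (fun s i =>
    let chunk := PySem.List.slice words (some i) (some (i + wl))
    if i + wl > (words.length : Int) ∧ (chunk.length : Int) < wl ∧ notLast = true then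
      ((chunk ++ s.1.headD []) :: s.1.drop 1, s.2)
    else
      (s.1, s.2 ++ [pvFmt page chunk])) st

-- outer `for idx, words in enumerate(text_toks)` loop; the fuel is the (constant) length of text_toks
def pvAGo : Nat → List (List String) → Int → Int → List String → List String
  | 0, _, _, _, chunks => chunks
  | _ + 1, [], _, _, chunks => chunks
  | n + 1, words :: rest, wl, page, chunks =>
    let s := pvAFold (PySem.List.pyRange 0 (words.length : Int) wl) words wl page
      (decide (rest ≠ [])) (rest, chunks)
    pvAGo n s.1 wl (page + 1) s.2

def text_to_chunks (texts : List String) (word_length : Int) (start_page : Int) : List String :=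
  pvAGo texts.length (texts.map pvSplitSp) word_length start_page []

-- ===== PORT B =====
-- port of `next(i for i, c in enumerate(cum) if e <= c)`: linear scan for the first index whose
-- cumulative count reaches e (the not-found case never arises for the full chunks that call it)
def pvNextIdx : List Int → Int → Nat
  | [], _ => 0
  | c :: cs, e => if e ≤ c then 0 else pvNextIdx cs e + 1

def text_to_chunks_alt (texts : List String) (word_length : Int) (start_page : Int) : List String :=
  -- first loop of Source B: words.extend(t.split(' ')); cum.append(len(words))
  let st := texts.foldl
    (fun (st : List String × List Int) t =>
      let w := st.1 ++ pvSplitSp t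
      (w, st.2 ++ [(w.length : Int)])) ([], [])
  -- second loop of Source B: chunk the global stream, label via cum
  (PySem.List.pyRange 0 (st.1.length : Int) word_length).foldl
    (fun acc j =>
      let chunk := PySem.List.slice st.1 (some j) (some (j + word_length))
      let page : Int :=
        if (chunk.length : Int) = word_length then (pvNextIdx st.2 (j + word_length) : Int)
        else (texts.length : Int) - 1
      acc ++ [pvFmt (page + start_page) chunk]) []

-- ===== PRECONDITION & SPEC =====
-- Pre_ excludes word_length = 0, where Python's range raises ValueError (step 0): A raises whenever
-- there is at least one page, and B's single global range raises even with no pages (see cite).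
def Pre_text_to_chunks (texts : List String) (word_length : Int) (start_page : Int) : Prop :=
  word_length ≠ 0
instance (texts : List String) (word_length : Int) (start_page : Int) : Decidable (Pre_text_to_chunks texts word_length start_page) := by unfold Pre_text_to_chunks; infer_instance

def pvWitness_text_to_chunks : List String × Int × Int := (["a b c", "d e"], 2, 1)

def Spec_text_to_chunks (texts : List String) (word_length : Int) (start_page : Int) (out : List String) : Prop := out = text_to_chunks_alt texts word_length start_page
instance (texts : List String) (word_length : Int) (start_page : Int) (out : List String) : Decidable (Spec_text_to_chunks texts word_length start_page out) := by unfold Spec_text_to_chunks; infer_instance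

-- ===== CLAIM (what is proved, stated in full; the proofs are below) =====
def Claim_equal_text_to_chunks : Prop := ∀ (texts : List String) (word_length : Int) (start_page : Int), Dom_text_to_chunks texts word_length start_page → Pre_text_to_chunks texts word_length start_page → Spec_text_to_chunks texts word_length start_page (text_to_chunks texts word_length start_page)

-- ===== LEMMAS AND PROOFS =====

-- ---- proof-side intermediate: the carry-threaded page loop (bridge between A and B) ----

-- inner chunking loop over one page's words: emits formatted chunks; a short chunk on a
-- non-last page becomes the carry and the loop breaks.  Returns (emitted chunks, carry).
def pvBInner : List Int → List String → Int → Int → Bool → List String × List String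
  | [], _, _, _, _ => ([], [])
  | i :: idxs, words, wl, page, lastPage =>
    let chunk := PySem.List.slice words (some i) (some (i + wl))
    if (chunk.length : Int) < wl ∧ lastPage = false then
      ([], chunk)
    else
      let r := pvBInner idxs words wl page lastPage
      (pvFmt page chunk :: r.1, r.2)

-- page loop threading the carry
def pvBGo : List String → Int → Int → List String → List String
  | [], _, _, _ => []
  | t :: rest, wl, page, carry =>
    let words := carry ++ pvSplitSp t
    let r := pvBInner (PySem.List.pyRange 0 (words.length : Int) wl) words wl page rest.isEmpty
    r.1 ++ pvBGo rest wl (page + 1) r.2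

-- A's text_toks after processing the first page: the carry is prepended to the next page's tokens
def pvCons : List String → List String → List (List String)
  | [], _ => []
  | t :: rest, carry => (carry ++ pvSplitSp t) :: rest.map pvSplitSp

lemma pvCons_nil (pages : List String) : pvCons pages [] = pages.map pvSplitSp := by
  cases pages <;> simp [pvCons]

lemma pyRange_pos_nil {a b s : Int} (hs : 0 < s) (h : b ≤ a) :
    PySem.List.pyRange a b s = [] := by
  simp [PySem.List.pyRange, show ¬ a < b by omega, show s ≠ 0 by omega, hs]

lemma pyRange_neg_nil {a b s : Int} (hs : s < 0) (h : a ≤ b) :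
    PySem.List.pyRange a b s = [] := by
  simp [PySem.List.pyRange, show ¬ b < a by omega, show s ≠ 0 by omega, show ¬ 0 < s by omega]

lemma pyRange_pos_cons {a b s : Int} (hs : 0 < s) (h : a < b) :
    PySem.List.pyRange a b s = a :: PySem.List.pyRange (a + s) b s := by
  rw [PySem.List.pyRange_of_pos a b hs, PySem.List.pyRange_of_pos (a + s) b hs]
  by_cases h2 : a + s < b
  · have e1 : b - a + s - 1 = (b - (a + s) + s - 1) + 1 * s := by ring
    have e2 : (b - a + s - 1) / s = (b - (a + s) + s - 1) / s + 1 := by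
      rw [e1, Int.add_mul_ediv_right _ _ (by omega : s ≠ 0)]
    have hnn : 0 ≤ (b - (a + s) + s - 1) / s := by
      apply Int.ediv_nonneg <;> omega
    rw [if_pos h, if_pos h2, e2]
    rw [show ((b - (a + s) + s - 1) / s + 1).toNat = ((b - (a + s) + s - 1) / s).toNat + 1 by omega]
    rw [List.range_succ_eq_map, List.map_cons, List.map_map]
    congr 1
    · simp
    · apply List.map_congr_left
      intro k _
      simp [Function.comp, Nat.succ_eq_add_one]
      ring
  · have h1 : 1 ≤ (b - a + s - 1) / s := by
      rw [Int.le_ediv_iff_mul_le hs]; omega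
    have h2' : (b - a + s - 1) / s < 2 := by
      rw [Int.ediv_lt_iff_lt_mul hs]; omega
    rw [if_pos h, if_neg h2, show (b - a + s - 1) / s = 1 by omega]
    simp

lemma pvChunkLen {words : List String} {k wl : Int} (hw : 0 < wl) (hk : 0 ≤ k)
    (hkl : k < (words.length : Int)) :
    ((PySem.List.slice words (some k) (some (k + wl))).length : Int)
      = min ((words.length : Int) - k) wl := by
  rw [PySem.List.length_slice]
  simp only [PySem.List.clampIdx]
  split_ifs <;> omega

-- last page: A never spills (notLast = false), B never breaks (lastPage = true)
lemma pvInnerLast (idxs : List Int) (words : List String) (wl page : Int)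
    (st : List (List String) × List String) :
    pvAFold idxs words wl page false st
        = (st.1, st.2 ++ (pvBInner idxs words wl page true).1)
      ∧ (pvBInner idxs words wl page true).2 = [] := by
  induction idxs generalizing st with
  | nil => simp [pvAFold, pvBInner]
  | cons i idxs ih =>
    refine ⟨?_, ?_⟩
    · simp only [pvAFold, List.foldl_cons]
      rw [if_neg (by simp)]
      have h1 := (ih (st.1, st.2 ++ [pvFmt page (PySem.List.slice words (some i) (some (i + wl)))])).1
      simp only [pvAFold] at h1
      rw [h1]
      simp only [pvBInner]
      rw [if_neg (by simp)]
      simp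
    · simp only [pvBInner]
      rw [if_neg (by simp)]
      exact (ih st).2

-- not the last page: A's fold over range(k, len, wl) with a live next-page r0 equals
-- the break-style inner loop with the resulting carry prepended to r0
lemma pvInnerNotLast (n : Nat) (k wl page : Int) (words r0 : List String)
    (rtail : List (List String)) (chunks : List String)
    (hw : 0 < wl) (hk : 0 ≤ k) (hn : ((words.length : Int) - k).toNat ≤ n) :
    pvAFold (PySem.List.pyRange k (words.length : Int) wl) words wl page true (r0 :: rtail, chunks)
      = (((pvBInner (PySem.List.pyRange k (words.length : Int) wl) words wl page false).2 ++ r0) :: rtail,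
         chunks ++ (pvBInner (PySem.List.pyRange k (words.length : Int) wl) words wl page false).1) := by
  induction n generalizing k chunks with
  | zero =>
    rw [pyRange_pos_nil hw (by omega)]
    simp [pvAFold, pvBInner]
  | succ n ih =>
    by_cases hkl : k < (words.length : Int)
    · rw [pyRange_pos_cons hw hkl]
      have hcl := pvChunkLen hw hk hkl (words := words)
      by_cases hpart : (words.length : Int) < k + wl
      · have hlt : ((PySem.List.slice words (some k) (some (k + wl))).length : Int) < wl := by
          rw [hcl]; omega
        simp only [pvAFold, List.foldl_cons, pvBInner]
        rw [if_pos ⟨by omega, hlt, by trivial⟩, if_pos ⟨hlt, by trivial⟩]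
        rw [pyRange_pos_nil hw (by omega)]
        simp
      · have hge : ¬ ((PySem.List.slice words (some k) (some (k + wl))).length : Int) < wl := by
          rw [hcl]; omega
        simp only [pvAFold, List.foldl_cons, pvBInner]
        rw [if_neg (by intro h; exact hge h.2.1), if_neg (by intro h; exact hge h.1)]
        have := ih (k + wl) (chunks ++ [pvFmt page (PySem.List.slice words (some k) (some (k + wl)))])
          (by omega) (by omega)
        simp only [pvAFold] at this
        rw [this]
        simp
    · rw [pyRange_pos_nil hw (by omega)]
      simp [pvAFold, pvBInner]

-- main invariant of the bridge: A's run over the live token lists (carry already merged into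
-- the head) equals the accumulated chunks plus the carry-threaded run from that carry
lemma pvMain (pages : List String) (wl page : Int) (carry chunks : List String)
    (hw : wl ≠ 0) :
    pvAGo pages.length (pvCons pages carry) wl page chunks
      = chunks ++ pvBGo pages wl page carry := by
  induction pages generalizing carry chunks page with
  | nil => simp [pvAGo, pvCons, pvBGo]
  | cons t rest ih =>
    simp only [pvCons, List.length_cons, pvAGo, pvBGo]
    rcases lt_or_gt_of_ne hw with hneg | hpos
    · rw [pyRange_neg_nil hneg (by positivity)]
      simp only [pvAFold, List.foldl_nil, pvBInner]
      rw [← pvCons_nil rest, ih (page + 1) [] chunks]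
      simp
    · cases rest with
      | nil =>
        have h := pvInnerLast (PySem.List.pyRange 0 ((carry ++ pvSplitSp t).length : Int) wl)
          (carry ++ pvSplitSp t) wl page ([], chunks)
        simp only [List.map_nil, decide_not, decide_true, Bool.not_true, List.isEmpty_nil]
        rw [h.1]
        simp [pvAGo, pvBGo]
      | cons t' rest' =>
        have h := pvInnerNotLast ((carry ++ pvSplitSp t).length) 0 wl page
          (carry ++ pvSplitSp t) (pvSplitSp t') (rest'.map pvSplitSp) chunks hpos le_rfl
          (by omega)
        simp only [List.map_cons, decide_not, List.isEmpty_cons]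
        rw [show (!decide (pvSplitSp t' :: List.map pvSplitSp rest' = [])) = true by simp]
        rw [h]
        rw [show ((pvBInner (PySem.List.pyRange 0 (↑(carry ++ pvSplitSp t).length) wl)
              (carry ++ pvSplitSp t) wl page false).2 ++ pvSplitSp t') :: List.map pvSplitSp rest'
            = pvCons (t' :: rest')
                (pvBInner (PySem.List.pyRange 0 (↑(carry ++ pvSplitSp t).length) wl)
                  (carry ++ pvSplitSp t) wl page false).2 from rfl]
        rw [ih]
        simp [pvBGo]

-- ---- proof-side spec of B: the global stream, cumulative boundaries, labelled emission ----

def pvFlat (pages : List String) : List String := (pages.map pvSplitSp).flatten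

def pvBnds : List String → Int → List Int
  | [], _ => []
  | t :: rest, base =>
    (base + ((pvSplitSp t).length : Int)) :: pvBnds rest (base + ((pvSplitSp t).length : Int))

-- emission over the global stream G from start index k: full chunks get label (page of their
-- end boundary) + p, the trailing partial chunk gets label `last`
def pvEmitF (G : List String) (bnds : List Int) (wl p last k : Int) : List String :=
  (PySem.List.pyRange k (G.length : Int) wl).map (fun j =>
    pvFmt (if ((PySem.List.slice G (some j) (some (j + wl))).length : Int) = wl
           then (pvNextIdx bnds (j + wl) : Int) + p else last)
          (PySem.List.slice G (some j) (some (j + wl))))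

lemma pvBuild (texts : List String) (w0 : List String) (c0 : List Int) :
    texts.foldl
      (fun (st : List String × List Int) t =>
        let w := st.1 ++ pvSplitSp t
        (w, st.2 ++ [(w.length : Int)])) (w0, c0)
      = (w0 ++ pvFlat texts, c0 ++ pvBnds texts (w0.length : Int)) := by
  induction texts generalizing w0 c0 with
  | nil => simp [pvFlat, pvBnds]
  | cons t rest ih =>
    simp only [List.foldl_cons, ih]
    simp [pvFlat, pvBnds, List.append_assoc]

lemma pvFoldMap (l : List Int) (f : Int → String) (acc : List String) :
    l.foldl (fun a j => a ++ [f j]) acc = acc ++ l.map f := by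
  induction l generalizing acc with
  | nil => simp
  | cons x xs ih => simp [ih]

-- port-to-spec: text_to_chunks_alt is pvEmitF on the flattened stream
lemma pvAltSpec (texts : List String) (wl sp : Int) :
    text_to_chunks_alt texts wl sp
      = pvEmitF (pvFlat texts) (pvBnds texts 0) wl sp ((texts.length : Int) - 1 + sp) 0 := by
  unfold text_to_chunks_alt
  simp only [pvBuild, List.nil_append, List.length_nil, Nat.cast_zero]
  rw [pvFoldMap]
  simp only [List.nil_append, pvEmitF]
  apply List.map_congr_left
  intro j _
  by_cases h : ((PySem.List.slice (pvFlat texts) (some j) (some (j + wl))).length : Int) = wl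
  · rw [if_pos h, if_pos h]
  · rw [if_neg h, if_neg h]

lemma pvNextIdx_shift (bnds : List Int) (e k : Int) :
    pvNextIdx (bnds.map (fun b => b - k)) (e - k) = pvNextIdx bnds e := by
  induction bnds with
  | nil => rfl
  | cons c cs ih =>
    simp only [List.map_cons, pvNextIdx]
    by_cases h : e ≤ c
    · rw [if_pos (by omega), if_pos h]
    · rw [if_neg (by omega), if_neg h, ih]

lemma pvSlicePrefix {α : Type} (xs ys : List α) (a b : Int) (ha : 0 ≤ a) (hab : a ≤ b)
    (hble : b ≤ (xs.length : Int)) :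
    PySem.List.slice (xs ++ ys) (some a) (some b) = PySem.List.slice xs (some a) (some b) := by
  rw [PySem.List.slice_toNat _ ha (by omega), PySem.List.slice_toNat _ ha (by omega)]
  rw [List.drop_append_of_le_length (by omega)]
  rw [List.take_append_of_le_length (by simp; omega)]

lemma pvSliceAll {α : Type} (xs : List α) (a b : Int) (ha : 0 ≤ a) (hb : (xs.length : Int) ≤ b) :
    PySem.List.slice xs (some a) (some b) = xs.drop a.toNat := by
  rw [PySem.List.slice_toNat _ ha (by omega)]
  apply List.take_of_length_le
  simp; omega

lemma pvSliceDrop {α : Type} (G : List α) (k j wl : Int) (hk : 0 ≤ k) (hj : 0 ≤ j)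
    (hw : 0 < wl) :
    PySem.List.slice G (some (k + j)) (some (k + j + wl))
      = PySem.List.slice (G.drop k.toNat) (some j) (some (j + wl)) := by
  rw [PySem.List.slice_toNat _ (by omega) (by omega), PySem.List.slice_toNat _ hj (by omega)]
  rw [List.drop_drop]
  rw [show (k + j + wl).toNat - (k + j).toNat = (j + wl).toNat - j.toNat by omega]
  rw [show k.toNat + j.toNat = (k + j).toNat by omega]

-- shifting the start of emission = dropping a prefix of the stream and translating boundaries
lemma pvEmitShift (n : Nat) (G : List String) (bnds : List Int) (wl p last k j : Int)
    (hw : 0 < wl) (hk : 0 ≤ k) (hj : 0 ≤ j) (hn : ((G.length : Int) - (k + j)).toNat ≤ n) :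
    pvEmitF G bnds wl p last (k + j)
      = pvEmitF (G.drop k.toNat) (bnds.map (fun b => b - k)) wl p last j := by
  induction n generalizing j with
  | zero =>
    unfold pvEmitF
    rw [pyRange_pos_nil hw (by omega),
        pyRange_pos_nil (a := j) (b := ((G.drop k.toNat).length : Int)) hw (by simp; omega)]
    simp
  | succ n ih =>
    by_cases hlt : k + j < (G.length : Int)
    · unfold pvEmitF
      rw [pyRange_pos_cons (a := k + j) (b := (G.length : Int)) hw hlt,
          pyRange_pos_cons (a := j) (b := ((G.drop k.toNat).length : Int)) hw (by simp; omega)]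
      simp only [List.map_cons]
      have hidx : pvNextIdx (bnds.map (fun b => b - k)) (j + wl) = pvNextIdx bnds (k + j + wl) := by
        rw [show j + wl = (k + j + wl) - k by ring, pvNextIdx_shift]
      congr 1
      · rw [pvSliceDrop G k j wl hk hj hw, ← hidx]
      · have h2 := ih (j + wl) (by omega) (by omega)
        rw [show k + (j + wl) = k + j + wl by ring] at h2
        unfold pvEmitF at h2
        exact h2
    · unfold pvEmitF
      rw [pyRange_pos_nil hw (by omega),
          pyRange_pos_nil (a := j) (b := ((G.drop k.toNat).length : Int)) hw (by simp; omega)]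
      simp

-- past the first boundary every chunk belongs to a later page: peel the head boundary
lemma pvTail (n : Nat) (G : List String) (bnds' : List Int) (m wl p last k : Int)
    (hw : 0 < wl) (hmk : m < k + wl) (hn : ((G.length : Int) - k).toNat ≤ n) :
    pvEmitF G (m :: bnds') wl p last k = pvEmitF G bnds' wl (p + 1) last k := by
  induction n generalizing k with
  | zero =>
    unfold pvEmitF
    rw [pyRange_pos_nil hw (by omega)]
    simp
  | succ n ih =>
    by_cases hlt : k < (G.length : Int)
    · unfold pvEmitF
      rw [pyRange_pos_cons (a := k) (b := (G.length : Int)) hw hlt]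
      simp only [List.map_cons]
      congr 1
      · by_cases h : ((PySem.List.slice G (some k) (some (k + wl))).length : Int) = wl
        · rw [if_pos h, if_pos h]
          congr 1
          simp only [pvNextIdx]
          rw [if_neg (by omega)]
          push_cast
          ring
        · rw [if_neg h, if_neg h]
      · have h2 := ih (k + wl) (by omega) (by omega)
        unfold pvEmitF at h2
        exact h2
    · unfold pvEmitF
      rw [pyRange_pos_nil hw (by omega)]
      simp

-- splitting the emission at the first page boundary: the chunks up to the boundary are exactly
-- what the inner loop of the bridge emits, and it stops with the carry = a suffix of the page
lemma pvSplit (n : Nat) (words F : List String) (bnds' : List Int) (wl p last k : Int)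
    (hw : 0 < wl) (hk : 0 ≤ k) (hkm : k ≤ (words.length : Int))
    (hn : ((words.length : Int) - k).toNat ≤ n) :
    (((pvBInner (PySem.List.pyRange k (words.length : Int) wl) words wl p false).2.length : Int)
        ≤ (words.length : Int))
    ∧ (pvBInner (PySem.List.pyRange k (words.length : Int) wl) words wl p false).2
        = words.drop ((words.length : Int)
            - ((pvBInner (PySem.List.pyRange k (words.length : Int) wl) words wl p false).2.length : Int)).toNat
    ∧ pvEmitF (words ++ F) ((words.length : Int) :: bnds') wl p last k
        = (pvBInner (PySem.List.pyRange k (words.length : Int) wl) words wl p false).1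
          ++ pvEmitF (words ++ F) bnds' wl (p + 1) last
              ((words.length : Int)
                - ((pvBInner (PySem.List.pyRange k (words.length : Int) wl) words wl p false).2.length : Int)) := by
  induction n generalizing k with
  | zero =>
    have hkm' : k = (words.length : Int) := by omega
    rw [pyRange_pos_nil hw (by omega)]
    simp only [pvBInner, List.length_nil]
    refine ⟨by omega, by simp, ?_⟩
    rw [pvTail ((words ++ F).length) (words ++ F) bnds' (words.length : Int) wl p last k hw
      (by omega) (by omega)]
    simp [hkm']
  | succ n ih =>
    by_cases hlt : k < (words.length : Int)
    · have hcl := pvChunkLen hw hk hlt (words := words)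
      rw [pyRange_pos_cons (a := k) (b := (words.length : Int)) hw hlt]
      by_cases hfull : k + wl ≤ (words.length : Int)
      · -- full chunk: both sides emit it with label p, then continue
        have hlen : ((PySem.List.slice words (some k) (some (k + wl))).length : Int) = wl := by
          rw [hcl]; omega
        simp only [pvBInner]
        rw [if_neg (by simp [hlen])]
        have IH := ih (k + wl) (by omega) (by omega) (by omega)
        refine ⟨IH.1, IH.2.1, ?_⟩
        have hGc : PySem.List.slice (words ++ F) (some k) (some (k + wl))
            = PySem.List.slice words (some k) (some (k + wl)) :=
          pvSlicePrefix words F k (k + wl) hk (by omega) hfull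
        have hstep : pvEmitF (words ++ F) ((words.length : Int) :: bnds') wl p last k
            = pvFmt p (PySem.List.slice words (some k) (some (k + wl)))
              :: pvEmitF (words ++ F) ((words.length : Int) :: bnds') wl p last (k + wl) := by
          unfold pvEmitF
          rw [pyRange_pos_cons (a := k) (b := ((words ++ F).length : Int)) hw (by simp; omega)]
          simp only [List.map_cons]
          congr 1
          rw [hGc, if_pos hlen]
          simp only [pvNextIdx, if_pos hfull]
          norm_num
        rw [hstep, IH.2.2]
        rfl
      · -- partial chunk: the inner loop breaks with this chunk as carry
        have hlen : ((PySem.List.slice words (some k) (some (k + wl))).length : Int)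
            = (words.length : Int) - k := by rw [hcl]; omega
        have hdrop : PySem.List.slice words (some k) (some (k + wl)) = words.drop k.toNat :=
          pvSliceAll words k (k + wl) hk (by omega)
        simp only [pvBInner]
        rw [if_pos ⟨by rw [hlen]; omega, trivial⟩]
        refine ⟨by rw [hlen]; omega, ?_, ?_⟩
        · rw [hlen, show (words.length : Int) - ((words.length : Int) - k) = k by ring]
          exact hdrop
        · rw [hlen, show (words.length : Int) - ((words.length : Int) - k) = k by ring]
          rw [pvTail ((words ++ F).length) (words ++ F) bnds' (words.length : Int) wl p last k hw
            (by omega) (by omega)]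
          simp
    · have hkm' : k = (words.length : Int) := by omega
      rw [pyRange_pos_nil hw (by omega)]
      simp only [pvBInner, List.length_nil]
      refine ⟨by omega, by simp, ?_⟩
      rw [pvTail ((words ++ F).length) (words ++ F) bnds' (words.length : Int) wl p last k hw
        (by omega) (by omega)]
      simp [hkm']

lemma pvBndsShift (pages : List String) (b k : Int) :
    (pvBnds pages b).map (fun x => x - k) = pvBnds pages (b - k) := by
  induction pages generalizing b with
  | nil => rfl
  | cons t rest ih =>
    simp only [pvBnds, List.map_cons, ih]
    congr 1
    · ring
    · congr 1; ring

-- the inner loop on the LAST page emits everything, labelled with p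
lemma pvLastPage (n : Nat) (words : List String) (wl p k : Int)
    (hw : 0 < wl) (hk : 0 ≤ k) (hn : ((words.length : Int) - k).toNat ≤ n) :
    (pvBInner (PySem.List.pyRange k (words.length : Int) wl) words wl p true).1
      = pvEmitF words [(words.length : Int)] wl p p k := by
  induction n generalizing k with
  | zero =>
    unfold pvEmitF
    rw [pyRange_pos_nil hw (by omega)]
    simp [pvBInner]
  | succ n ih =>
    by_cases hlt : k < (words.length : Int)
    · have hcl := pvChunkLen hw hk hlt (words := words)
      rw [pyRange_pos_cons (a := k) (b := (words.length : Int)) hw hlt]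
      simp only [pvBInner]
      rw [if_neg (by simp)]
      have hstep : pvEmitF words [(words.length : Int)] wl p p k
          = pvFmt p (PySem.List.slice words (some k) (some (k + wl)))
            :: pvEmitF words [(words.length : Int)] wl p p (k + wl) := by
        unfold pvEmitF
        rw [pyRange_pos_cons (a := k) (b := (words.length : Int)) hw hlt]
        simp only [List.map_cons]
        congr 1
        by_cases hfull : ((PySem.List.slice words (some k) (some (k + wl))).length : Int) = wl
        · rw [if_pos hfull]
          simp only [pvNextIdx, if_pos (show k + wl ≤ (words.length : Int) by omega)]
          norm_num
        · rw [if_neg hfull]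
      rw [hstep, ih (k + wl) (by omega) (by omega)]
    · unfold pvEmitF
      rw [pyRange_pos_nil hw (by omega)]
      simp [pvBInner]

-- the carry-threaded page loop equals labelled emission over the global stream
lemma pvMain2 (pages : List String) (wl : Int) (hw : 0 < wl) :
    ∀ (p last : Int) (carry : List String), pages ≠ [] →
      last = p + (pages.length : Int) - 1 →
      pvBGo pages wl p carry
        = pvEmitF (carry ++ pvFlat pages) (pvBnds pages (carry.length : Int)) wl p last 0 := by
  induction pages with
  | nil => intro _ _ _ hne; exact absurd rfl hne
  | cons t rest ih =>
    intro p last carry _ hlast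
    cases rest with
    | nil =>
      simp only [pvBGo, List.isEmpty_nil, pvFlat, List.map_cons, List.map_nil,
        List.flatten_cons, List.flatten_nil, List.append_nil, pvBnds]
      rw [pvLastPage (carry ++ pvSplitSp t).length (carry ++ pvSplitSp t) wl p 0 hw le_rfl
        (by omega)]
      have hb : (carry.length : Int) + ((pvSplitSp t).length : Int)
          = ((carry ++ pvSplitSp t).length : Int) := by simp
      have hl : last = p := by simp at hlast; omega
      rw [hb, hl]
    | cons t' rest' =>
      simp only [pvBGo, List.isEmpty_cons]
      have hm0 : (0 : Int) ≤ ((carry ++ pvSplitSp t).length : Int) := by positivity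
      have hS := pvSplit (carry ++ pvSplitSp t).length (carry ++ pvSplitSp t)
        (pvFlat (t' :: rest')) (pvBnds (t' :: rest') ((carry ++ pvSplitSp t).length : Int))
        wl p last 0 hw le_rfl hm0 (by omega)
      set r := pvBInner (PySem.List.pyRange 0 ((carry ++ pvSplitSp t).length : Int) wl)
        (carry ++ pvSplitSp t) wl p false with hr
      have h1 := hS.1
      have h2 := hS.2.1
      have hGeq : carry ++ pvFlat (t :: t' :: rest')
          = (carry ++ pvSplitSp t) ++ pvFlat (t' :: rest') := by
        simp [pvFlat]
      have hBeq : pvBnds (t :: t' :: rest') (carry.length : Int)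
          = ((carry ++ pvSplitSp t).length : Int)
            :: pvBnds (t' :: rest') ((carry ++ pvSplitSp t).length : Int) := by
        simp only [pvBnds]
        have hb : (carry.length : Int) + ((pvSplitSp t).length : Int)
            = ((carry ++ pvSplitSp t).length : Int) := by simp
        rw [hb]
      rw [hGeq, hBeq, hS.2.2]
      congr 1
      have hsh := pvEmitShift ((carry ++ pvSplitSp t) ++ pvFlat (t' :: rest')).length
        ((carry ++ pvSplitSp t) ++ pvFlat (t' :: rest'))
        (pvBnds (t' :: rest') ((carry ++ pvSplitSp t).length : Int)) wl (p + 1) last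
        (((carry ++ pvSplitSp t).length : Int) - (r.2.length : Int)) 0 hw (by omega) le_rfl
        (by omega)
      simp only [add_zero] at hsh
      rw [hsh, pvBndsShift]
      rw [List.drop_append_of_le_length (by omega)]
      rw [show ((carry ++ pvSplitSp t).length : Int)
            - (((carry ++ pvSplitSp t).length : Int) - (r.2.length : Int)) = (r.2.length : Int)
          by ring]
      rw [show ((carry ++ pvSplitSp t).drop
            ((((carry ++ pvSplitSp t).length : Int) - (r.2.length : Int)).toNat)) = r.2
          from h2.symm]
      exact ih (p + 1) last r.2 (by simp) (by simp at hlast ⊢; omega)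

-- a negative step makes every range empty: the page loop emits nothing
lemma pvBGo_neg (pages : List String) (wl p : Int) (carry : List String) (hw : wl < 0) :
    pvBGo pages wl p carry = [] := by
  induction pages generalizing p carry with
  | nil => rfl
  | cons t rest ih =>
    simp only [pvBGo]
    rw [pyRange_neg_nil hw (by positivity)]
    simp only [pvBInner]
    rw [ih]
    simp

-- ===== VERDICT (by name: the statement is the Claim_ definition above) =====
theorem text_to_chunks_spec : Claim_equal_text_to_chunks := by
  intro texts wl sp _ hpre
  show text_to_chunks texts wl sp = text_to_chunks_alt texts wl sp
  unfold text_to_chunks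
  rw [← pvCons_nil texts, pvMain texts wl sp [] [] hpre, pvAltSpec]
  simp only [List.nil_append]
  rcases lt_or_gt_of_ne hpre with hneg | hpos
  · rw [pvBGo_neg texts wl sp [] hneg]
    unfold pvEmitF
    rw [pyRange_neg_nil hneg (by positivity)]
    simp
  · cases texts with
    | nil =>
      unfold pvEmitF
      rw [pyRange_pos_nil hpos (by simp [pvFlat])]
      simp [pvBGo]
    | cons t rest =>
      rw [pvMain2 (t :: rest) wl hpos sp (((t :: rest).length : Int) - 1 + sp) [] (by simp)
        (by ring)]
      simp
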